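-- pv_equiv track=rewrite | github.com/mileoa/8tasks | white_walkers/white_walkers.py | white_walkers_recursive
-- ===== SOURCE A (Python) =====
-- def white_walkers_recursive(
--     village: str, i: int, enemy_count: int, previous: int, was_valid_pair: bool
-- ) -> bool:
--     """Return whether there are enemies."""
--     # if enemy_count == 3 and began:
--     #    return True
--     if i == len(village):
--         return was_valid_pair
--     if ord(village[i]) >= 48 and ord(village[i]) <= 57:
--         if previous + int(village[i]) != 10:
--             previous = int(village[i])
--         elif enemy_count != 3:
--             return False
--         else:
--             previous = int(village[i])
--             enemy_count = 0
--             was_valid_pair = True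
--
--     if village[i] == "=" and previous != -1:
--         enemy_count += 1
--     return white_walkers_recursive(
--         village, i + 1, enemy_count, previous, was_valid_pair
--     )
-- ===== SOURCE B (Python) =====
-- def white_walkers_recursive(village, i, enemy_count, previous, was_valid_pair):
--     while i < len(village):
--         c = village[i]
--         o = ord(c)
--         if 48 <= o <= 57:
--             d = o - 48
--             if previous + d != 10:
--                 previous = d
--             elif enemy_count != 3:
--                 return False
--             else:
--                 previous, enemy_count, was_valid_pair = d, 0, True
--         if c == "=" and previous != -1:
--             enemy_count += 1
--         i += 1
--     return was_valid_pair
-- ===== Notes on version B (the rewrite author's own statement) =====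
-- stated objective: simpler
-- what changed: B replaces A's five-argument recursion by a plain while loop that mutates the state variables in place, keeping the identical per-character logic; this removes the recursive call overhead and Python's recursion-depth limit.
import Mathlib
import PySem

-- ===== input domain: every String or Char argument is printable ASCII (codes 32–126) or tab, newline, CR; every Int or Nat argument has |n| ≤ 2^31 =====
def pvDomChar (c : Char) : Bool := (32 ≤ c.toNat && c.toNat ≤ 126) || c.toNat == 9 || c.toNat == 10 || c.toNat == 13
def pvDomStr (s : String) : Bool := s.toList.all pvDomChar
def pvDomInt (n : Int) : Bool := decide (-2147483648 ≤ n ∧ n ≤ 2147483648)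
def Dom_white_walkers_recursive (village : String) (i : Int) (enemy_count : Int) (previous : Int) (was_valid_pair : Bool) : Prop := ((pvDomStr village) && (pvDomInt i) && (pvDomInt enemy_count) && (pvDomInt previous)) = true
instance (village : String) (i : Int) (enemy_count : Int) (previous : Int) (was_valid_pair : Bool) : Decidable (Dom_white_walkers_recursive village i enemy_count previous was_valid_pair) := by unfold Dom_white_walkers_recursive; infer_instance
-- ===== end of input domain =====

-- B replaces A's five-argument recursion by a plain while loop over the same state;
-- objective: simpler in Python (no recursive call per character, no recursion-depth limit).

-- ===== PORT A =====
-- Literal port of A's recursion on the index i.  village[i] is PySem.List.pyGet?;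
-- the `none` branch is where Python raises IndexError (excluded by Pre_).
-- int(village[i]) on a digit character is exactly ord - 48, i.e. (c.toNat : Int) - 48.
def wwA_go (l : List Char) (i ec prev : Int) (wvp : Bool) : Bool :=
  if i = (l.length : Int) then wvp
  else
    match hg : PySem.List.pyGet? l i with
    | none => false  -- IndexError in Python; unreachable under Pre_
    | some c =>
      let j : Int := c.toNat          -- ord(village[i])
      -- the if/elif/else on the digit; `none` encodes the mid-function `return False`
      let st? : Option (Int × Int × Bool) :=
        if 48 ≤ j ∧ j ≤ 57 then
          if prev + (j - 48) ≠ 10 then some (ec, j - 48, wvp)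
          else if ec ≠ 3 then none
          else some (0, j - 48, true)
        else some (ec, prev, wvp)
      match st? with
      | none => false
      | some (ec1, prev1, wvp1) =>
        let ec2 := if c = '=' ∧ prev1 ≠ -1 then ec1 + 1 else ec1
        wwA_go l (i + 1) ec2 prev1 wvp1
termination_by ((l.length : Int) - i).toNat
decreasing_by
  have hir : PySem.Raise.InRange l.length i := by
    by_contra h
    rw [← PySem.List.pyGet?_eq_none_iff (xs := l)] at h
    simp [h] at hg
  have : i < (l.length : Int) := hir.2
  omega

def white_walkers_recursive (village : String) (i : Int) (enemy_count : Int) (previous : Int) (was_valid_pair : Bool) : Bool :=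
  wwA_go village.toList i enemy_count previous was_valid_pair

-- ===== PORT B =====
-- B's loop body on one character: updates the state triple (enemy_count, previous,
-- was_valid_pair); `none` is the early `return False`.
def wwB_step (c : Char) : Int × Int × Bool → Option (Int × Int × Bool)
  | (ec, prev, wvp) =>
    let o : Int := c.toNat
    let afterDigit : Option (Int × Int × Bool) :=
      if 48 ≤ o ∧ o ≤ 57 then
        let d := o - 48
        if prev + d ≠ 10 then some (ec, d, wvp)
        else if ec ≠ 3 then none
        else some (0, d, true)
      else some (ec, prev, wvp)
    afterDigit.map fun st' =>
      if c = '=' ∧ st'.2.1 ≠ -1 then (st'.1 + 1, st'.2.1, st'.2.2) else st'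

-- B's while loop: `while i < len(village)` driving wwB_step; the pyGet? `none`
-- branch is Python's IndexError (i < -len; outside Pre_).
def wwB_loop (l : List Char) (i : Int) (st : Int × Int × Bool) : Bool :=
  if i < (l.length : Int) then
    match hg : PySem.List.pyGet? l i with
    | none => false
    | some c =>
      match wwB_step c st with
      | none => false
      | some st' => wwB_loop l (i + 1) st'
  else st.2.2
termination_by ((l.length : Int) - i).toNat
decreasing_by
  have hir : PySem.Raise.InRange l.length i := by
    by_contra h
    rw [← PySem.List.pyGet?_eq_none_iff (xs := l)] at h
    simp [h] at hg
  have : i < (l.length : Int) := hir.2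
  omega

def white_walkers_recursive_alt (village : String) (i : Int) (enemy_count : Int) (previous : Int) (was_valid_pair : Bool) : Bool :=
  wwB_loop village.toList i (enemy_count, previous, was_valid_pair)

-- ===== PRECONDITION & SPEC =====
-- Pre_ excludes exactly the inputs on which A raises IndexError: i > len(village) or i < -len(village).
def Pre_white_walkers_recursive (village : String) (i : Int) (enemy_count : Int) (previous : Int) (was_valid_pair : Bool) : Prop :=
  -(village.toList.length : Int) ≤ i ∧ i ≤ (village.toList.length : Int)
instance (village : String) (i : Int) (enemy_count : Int) (previous : Int) (was_valid_pair : Bool) : Decidable (Pre_white_walkers_recursive village i enemy_count previous was_valid_pair) := by unfold Pre_white_walkers_recursive; infer_instance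

def pvWitness_white_walkers_recursive : String × Int × Int × Int × Bool := ("3=7=", 0, 0, -1, false)

def Spec_white_walkers_recursive (village : String) (i : Int) (enemy_count : Int) (previous : Int) (was_valid_pair : Bool) (out : Bool) : Prop := out = white_walkers_recursive_alt village i enemy_count previous was_valid_pair
instance (village : String) (i : Int) (enemy_count : Int) (previous : Int) (was_valid_pair : Bool) (out : Bool) : Decidable (Spec_white_walkers_recursive village i enemy_count previous was_valid_pair out) := by unfold Spec_white_walkers_recursive; infer_instance

-- ===== CLAIM (what is proved, stated in full; the proofs are below) =====
def Claim_equal_white_walkers_recursive : Prop := ∀ (village : String) (i : Int) (enemy_count : Int) (previous : Int) (was_valid_pair : Bool), Dom_white_walkers_recursive village i enemy_count previous was_valid_pair → Pre_white_walkers_recursive village i enemy_count previous was_valid_pair → Spec_white_walkers_recursive village i enemy_count previous was_valid_pair (white_walkers_recursive village i enemy_count previous was_valid_pair)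

-- ===== LEMMAS AND PROOFS =====

-- A's per-character block (the if/elif/else plus the trailing '=' statement, with the
-- mid-function `return False` as the `false` branch) equals B's wwB_step driven through
-- any continuation K.
lemma wwCharStep (c : Char) (ec prev : Int) (wvp : Bool) (K : Int → Int → Bool → Bool) :
    (match (if 48 ≤ (c.toNat : Int) ∧ (c.toNat : Int) ≤ 57 then
              if prev + ((c.toNat : Int) - 48) ≠ 10 then some (ec, (c.toNat : Int) - 48, wvp)
              else if ec ≠ 3 then none
              else some (0, (c.toNat : Int) - 48, true)
            else some (ec, prev, wvp)) with
     | none => false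
     | some (ec1, prev1, wvp1) => K (if c = '=' ∧ prev1 ≠ -1 then ec1 + 1 else ec1) prev1 wvp1)
    =
    (match wwB_step c (ec, prev, wvp) with
     | none => false
     | some st' => K st'.1 st'.2.1 st'.2.2) := by
  unfold wwB_step
  dsimp only
  split_ifs <;> simp only [Option.map_some, Option.map_none] <;> split_ifs <;> rfl

lemma wwKey (l : List Char) : ∀ (n : Nat) (i ec prev : Int) (wvp : Bool),
    ((l.length : Int) - i).toNat = n → -(l.length : Int) ≤ i → i ≤ (l.length : Int) →
    wwA_go l i ec prev wvp = wwB_loop l i (ec, prev, wvp) := by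
  intro n
  induction n with
  | zero =>
    intro i ec prev wvp hn h1 h2
    have hi : i = (l.length : Int) := by omega
    subst hi
    rw [wwA_go, wwB_loop]
    simp
  | succ n ih =>
    intro i ec prev wvp hn h1 h2
    have hlt : i < (l.length : Int) := by omega
    obtain ⟨c, hc⟩ : ∃ c, PySem.List.pyGet? l i = some c := by
      cases hc : PySem.List.pyGet? l i with
      | none =>
        exact absurd (show PySem.Raise.InRange l.length i from ⟨h1, hlt⟩) ((PySem.List.pyGet?_eq_none_iff (xs := l) (i := i)).mp hc)
      | some c => exact ⟨c, rfl⟩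
    rw [wwA_go, wwB_loop, if_neg (show ¬ i = ((l.length : Nat) : Int) by omega),
      if_pos hlt]
    split
    · next heq => rw [hc] at heq
    · next c' heq =>
      rw [hc] at heq; injection heq with h; subst h
      refine (wwCharStep c ec prev wvp (fun e p w => wwA_go l (i + 1) e p w)).trans ?_
      cases wwB_step c (ec, prev, wvp) with
      | none => rfl
      | some st' => exact ih (i + 1) st'.1 st'.2.1 st'.2.2 (by omega) (by omega) (by omega)

-- ===== VERDICT (by name: the statement is the Claim_ definition above) =====
theorem white_walkers_recursive_spec : Claim_equal_white_walkers_recursive := by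
  intro village i ec prev wvp _hdom hpre
  obtain ⟨h1, h2⟩ := hpre
  unfold Spec_white_walkers_recursive white_walkers_recursive white_walkers_recursive_alt
  exact wwKey village.toList _ i ec prev wvp rfl h1 h2
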